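-- pv_equiv track=rewrite | github.com/Varshith07827/AI-PII-Detector | pii_detector/masking.py | _mask_digits_keep_tail
-- ===== SOURCE A (Python) =====
-- def _mask_digits_keep_tail(value: str, keep: int) -> str:
--     # Preserve separators and length; keep last N digits, mask other digits with '*'
--     out_chars = []
--     digits_seen = 0
--     for ch in reversed(value):
--         if ch.isdigit():
--             digits_seen += 1
--             if digits_seen <= keep:
--                 out_chars.append(ch)
--             else:
--                 out_chars.append("*")
--         else:
--             out_chars.append(ch)
--     return "".join(reversed(out_chars))
-- ===== SOURCE B (Python) =====
-- def _mask_digits_keep_tail(value: str, keep: int) -> str: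
--     # Two-phase cut-point algorithm: scan from the right only far enough to
--     # locate the start of the suffix holding the last `keep` digits, then
--     # return the masked prefix (digits -> '*') plus the original suffix verbatim.
--     cut = len(value)
--     d = 0
--     while cut > 0 and d < keep:
--         cut -= 1
--         if value[cut].isdigit():
--             d += 1
--     return "".join("*" if ch.isdigit() else ch for ch in value[:cut]) + value[cut:]
-- ===== Notes on version B (the rewrite author's own statement) =====
-- stated objective: alternative
-- what changed: Replaces A's full reverse-iterate-and-reverse pass with a cut-point algorithm: a short right-to-left scan locates where the last `keep` digits start, then the prefix is masked and the original suffix is copied verbatim.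
import Mathlib
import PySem

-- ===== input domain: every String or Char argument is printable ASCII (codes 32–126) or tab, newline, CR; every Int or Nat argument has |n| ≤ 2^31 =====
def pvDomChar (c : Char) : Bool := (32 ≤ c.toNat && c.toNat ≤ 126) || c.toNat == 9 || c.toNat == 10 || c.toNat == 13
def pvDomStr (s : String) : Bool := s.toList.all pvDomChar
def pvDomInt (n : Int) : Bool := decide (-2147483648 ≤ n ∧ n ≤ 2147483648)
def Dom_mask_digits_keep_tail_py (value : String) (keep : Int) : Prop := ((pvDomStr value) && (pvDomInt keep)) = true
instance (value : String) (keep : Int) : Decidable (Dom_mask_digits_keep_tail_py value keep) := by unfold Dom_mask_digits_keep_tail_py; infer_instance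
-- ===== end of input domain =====

-- B replaces A's full reverse-iterate-and-reverse pass by a cut-point algorithm:
-- a right-to-left scan only locates where the last `keep` digits start, then the
-- prefix is masked and the original suffix copied verbatim (objective: alternative).


-- ===== PORT A =====
-- the for-loop over reversed(value): state (out_chars in reverse build order, digits_seen)
def maskA_go (keep : Int) : List Char → Int → List Char
  | [], _ => []
  | c :: cs, seen =>
    if PySem.Chars.isdigit c then
      (if seen + 1 ≤ keep then c else '*') :: maskA_go keep cs (seen + 1)
    else
      c :: maskA_go keep cs seen

def mask_digits_keep_tail_py (value : String) (keep : Int) : String :=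
  String.ofList ((maskA_go keep value.toList.reverse 0).reverse)

-- ===== PORT B =====
-- the while loop 'while cut > 0 and d < keep: cut -= 1; …' consumed as a recursion
-- over the reversed character list; it returns n - cut, the length of the kept suffix
def suffLen (k : Int) : List Char → Nat
  | [] => 0
  | c :: cs => if k ≤ 0 then 0 else 1 + (if PySem.Chars.isdigit c then suffLen (k - 1) cs else suffLen k cs)

def mask_digits_keep_tail_py_alt (value : String) (keep : Int) : String :=
  let l := value.toList
  let cut : Nat := l.length - suffLen keep l.reverse
  String.ofList ((l.take cut).map (fun c => if PySem.Chars.isdigit c then '*' else c) ++ l.drop cut)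

-- ===== PRECONDITION & SPEC =====
def Spec_mask_digits_keep_tail_py (value : String) (keep : Int) (out : String) : Prop := out = mask_digits_keep_tail_py_alt value keep
instance (value : String) (keep : Int) (out : String) : Decidable (Spec_mask_digits_keep_tail_py value keep out) := by unfold Spec_mask_digits_keep_tail_py; infer_instance

-- ===== CLAIM (what is proved, stated in full; the proofs are below) =====
def Claim_equal_mask_digits_keep_tail_py : Prop := ∀ (value : String) (keep : Int), Dom_mask_digits_keep_tail_py value keep → Spec_mask_digits_keep_tail_py value keep (mask_digits_keep_tail_py value keep)

-- ===== LEMMAS AND PROOFS =====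

-- A's loop, with the running counter folded into the remaining budget keep - seen
def maskG (k : Int) : List Char → List Char
  | [] => []
  | c :: cs =>
    if PySem.Chars.isdigit c then
      (if 1 ≤ k then c else '*') :: maskG (k - 1) cs
    else
      c :: maskG k cs

theorem maskA_go_eq_maskG (keep : Int) (l : List Char) (seen : Int) :
    maskA_go keep l seen = maskG (keep - seen) l := by
  induction l generalizing seen with
  | nil => rfl
  | cons c cs ih =>
    by_cases hc : PySem.Chars.isdigit c
    · simp only [maskA_go, maskG, hc, if_true, ih (seen + 1)]
      have e1 : keep - (seen + 1) = keep - seen - 1 := by ring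
      rw [e1]
      by_cases h : seen + 1 ≤ keep
      · simp [h, show (1:Int) ≤ keep - seen by omega]
      · simp [h, show ¬((1:Int) ≤ keep - seen) by omega]
    · simp only [maskA_go, maskG, hc, Bool.false_eq_true, if_false, ih seen]

theorem suffLen_le_length (k : Int) (l : List Char) : suffLen k l ≤ l.length := by
  induction l generalizing k with
  | nil => simp [suffLen]
  | cons c cs ih =>
    simp only [suffLen, List.length_cons]
    split_ifs with h1 h2
    · omega
    · have := ih (k - 1); omega
    · have := ih k; omega

-- on the reversed list, A's loop keeps exactly the first suffLen characters and
-- masks the digits among the rest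
theorem maskG_eq_take_map_drop (k : Int) (l : List Char) :
    maskG k l = l.take (suffLen k l) ++
      (l.drop (suffLen k l)).map (fun c => if PySem.Chars.isdigit c then '*' else c) := by
  induction l generalizing k with
  | nil => rfl
  | cons c cs ih =>
    by_cases hk : k ≤ 0
    · have hk1 : ¬ (1 ≤ k) := by omega
      have hk0 : suffLen k (c :: cs) = 0 := by simp [suffLen, hk]
      rw [hk0]
      simp only [List.take_zero, List.drop_zero, List.nil_append, List.map]
      by_cases hc : PySem.Chars.isdigit c
      · simp only [maskG, hc, if_true, hk1, if_false]
        have : suffLen (k - 1) cs = 0 := by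
          cases cs with
          | nil => rfl
          | cons d ds => simp [suffLen]; omega
        rw [ih (k - 1), this]; simp
      · simp only [maskG, hc, Bool.false_eq_true, if_false]
        have : suffLen k cs = 0 := by
          cases cs with
          | nil => rfl
          | cons d ds => simp [suffLen, hk]
        rw [ih k, this]; simp
    · have hs : suffLen k (c :: cs) =
          1 + (if PySem.Chars.isdigit c then suffLen (k - 1) cs else suffLen k cs) := by
        simp [suffLen, hk]
      by_cases hc : PySem.Chars.isdigit c
      · simp only [hc, if_true] at hs
        rw [hs]
        have hk1 : (1 ≤ k) := by omega
        simp only [maskG, hc, if_true, hk1, Nat.add_comm 1, List.take_succ_cons,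
          List.drop_succ_cons, List.cons_append, ih (k - 1)]
      · simp only [hc, Bool.false_eq_true, if_false] at hs
        rw [hs]
        simp only [maskG, hc, Bool.false_eq_true, if_false, Nat.add_comm 1,
          List.take_succ_cons, List.drop_succ_cons, List.cons_append, ih k]

-- ===== VERDICT (by name: the statement is the Claim_ definition above) =====
theorem mask_digits_keep_tail_py_spec : Claim_equal_mask_digits_keep_tail_py := by
  intro value keep _
  unfold Spec_mask_digits_keep_tail_py mask_digits_keep_tail_py mask_digits_keep_tail_py_alt
  set l := value.toList with hl
  set r := l.reverse with hr
  set s := suffLen keep r with hs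
  have hsle : s ≤ l.length := by
    have := suffLen_le_length keep r
    simpa [hr] using this
  have hA : maskA_go keep r 0 = maskG keep r := by
    simpa using maskA_go_eq_maskG keep r 0
  rw [hA, maskG_eq_take_map_drop]
  show String.ofList _ = String.ofList _
  rw [← hr, ← hs]
  congr 1
  rw [List.reverse_append]
  congr 1
  · rw [← List.map_reverse]
    congr 1
    rw [List.reverse_drop, hr, List.reverse_reverse, List.length_reverse]
  · rw [List.reverse_take, hr, List.reverse_reverse, List.length_reverse]
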